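-- pv_equiv track=rewrite | github.com/mathelai/github.io | imo2003p1/simulation.py | verify_disjoint
-- ===== SOURCE A (Python) =====
-- from typing import Set, List, Tuple, Optional
--
-- def verify_disjoint(A: Set[int], offsets: List[int]) -> bool:
--     """Verify that the translated sets are pairwise disjoint."""
--     translated_sets = []
--     for x in offsets:
--         translated_sets.append({a + x for a in A})
--
--     # Check all pairs
--     for i in range(len(translated_sets)):
--         for j in range(i + 1, len(translated_sets)):
--             if translated_sets[i].intersection(translated_sets[j]):
--                 return False
--     return True
-- ===== SOURCE B (Python) =====
-- def verify_disjoint(A, offsets):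
--     """Verify that the translated sets are pairwise disjoint."""
--     vals = sorted(a + x for x in offsets for a in set(A))
--     for u, v in zip(vals, vals[1:]):
--         if u == v:
--             return False
--     return True
-- ===== Notes on version B (the rewrite author's own statement) =====
-- stated objective: simpler
-- what changed: Instead of materialising every translated set and intersecting all O(k^2) pairs, B flattens all translated values of the deduplicated A into one list, sorts it, and reports a violation exactly when two adjacent sorted values are equal.
import Mathlib
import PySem

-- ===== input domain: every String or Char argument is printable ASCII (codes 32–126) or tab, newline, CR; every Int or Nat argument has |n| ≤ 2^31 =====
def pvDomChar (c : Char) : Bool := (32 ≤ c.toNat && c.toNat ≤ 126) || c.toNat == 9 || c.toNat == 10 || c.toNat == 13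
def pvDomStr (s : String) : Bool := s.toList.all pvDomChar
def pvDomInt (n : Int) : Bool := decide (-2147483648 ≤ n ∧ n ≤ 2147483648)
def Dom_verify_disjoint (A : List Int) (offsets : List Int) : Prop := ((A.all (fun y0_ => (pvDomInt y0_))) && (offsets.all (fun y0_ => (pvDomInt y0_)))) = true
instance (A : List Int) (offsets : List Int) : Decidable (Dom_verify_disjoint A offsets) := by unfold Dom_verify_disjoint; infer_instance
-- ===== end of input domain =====

-- B flattens all translated values of the deduplicated A into one sorted list and looks for
-- an equal adjacent pair, instead of intersecting all pairs of materialised translated sets.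

-- ===== PORT A =====
def verify_disjoint (A : List Int) (offsets : List Int) : Bool :=
  -- translated_sets = []; for x in offsets: translated_sets.append({a + x for a in A})
  let translated_sets : List (PySem.Set Int) :=
    offsets.foldl (fun acc x => acc ++ [PySem.Set.ofList (A.map (fun a => a + x))]) []
  -- for i in range(len): for j in range(i+1, len): if intersection: return False
  (PySem.List.pyRange 0 translated_sets.length 1).all (fun i =>
    (PySem.List.pyRange (i + 1) translated_sets.length 1).all (fun j =>
      PySem.Set.inter (PySem.List.pyGetD translated_sets i [])
          (PySem.List.pyGetD translated_sets j []) == []))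

-- ===== PORT B =====
-- for u, v in zip(vals, vals[1:]): if u == v: return False / return True
def pvAdjOk : List Int → Bool
  | u :: v :: rest => if u == v then false else pvAdjOk (v :: rest)
  | _ => true

def verify_disjoint_alt (A : List Int) (offsets : List Int) : Bool :=
  let vals := PySem.List.sorted
    (offsets.flatMap (fun x => (PySem.Set.ofList A).map (fun a => a + x))) (fun v => v) false
  pvAdjOk vals

-- ===== PRECONDITION & SPEC =====
def Spec_verify_disjoint (A : List Int) (offsets : List Int) (out : Bool) : Prop := out = verify_disjoint_alt A offsets
instance (A : List Int) (offsets : List Int) (out : Bool) : Decidable (Spec_verify_disjoint A offsets out) := by unfold Spec_verify_disjoint; infer_instance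

-- ===== CLAIM (what is proved, stated in full; the proofs are below) =====
def Claim_equal_verify_disjoint : Prop := ∀ (A : List Int) (offsets : List Int), Dom_verify_disjoint A offsets → Spec_verify_disjoint A offsets (verify_disjoint A offsets)

-- ===== LEMMAS AND PROOFS =====

-- B's adjacent scan says: consecutive elements differ.
theorem pvAdjOk_iff_chain' (l : List Int) : pvAdjOk l = true ↔ l.IsChain (fun a b => a ≠ b) := by
  induction l with
  | nil => simp [pvAdjOk]
  | cons a l ih =>
    cases l with
    | nil => simp [pvAdjOk]
    | cons b m =>
      rw [List.isChain_cons_cons]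
      by_cases h : a = b
      · simp [pvAdjOk, h]
      · simp [pvAdjOk, h, ih]

theorem chain_lt_of_chain_ne (l : List Int) (hp : l.Pairwise (· ≤ ·))
    (hc : l.IsChain (fun a b => a ≠ b)) : l.IsChain (· < ·) := by
  induction l with
  | nil => simp
  | cons a l ih =>
    cases l with
    | nil => simp
    | cons b m =>
      rw [List.isChain_cons_cons] at hc ⊢
      rcases List.pairwise_cons.mp hp with ⟨ha, hp'⟩
      exact ⟨lt_of_le_of_ne (ha b (by simp)) hc.1, ih hp' hc.2⟩

-- B returns true iff the flattened multiset has no duplicates.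
theorem alt_iff_nodup (A offsets : List Int) :
    verify_disjoint_alt A offsets = true ↔
      (offsets.flatMap (fun x => (PySem.Set.ofList A).map (fun a => a + x))).Nodup := by
  unfold verify_disjoint_alt
  set M := offsets.flatMap (fun x => (PySem.Set.ofList A).map (fun a => a + x)) with hM
  rw [pvAdjOk_iff_chain']
  have hperm := PySem.List.sorted_perm M (fun v => v) false
  constructor
  · intro hc
    have hp : (PySem.List.sorted M (fun v => v) false).Pairwise (· ≤ ·) :=
      PySem.List.sorted_pairwise M (fun v => v)
    have hlt := (chain_lt_of_chain_ne _ hp hc).pairwise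
    exact (List.Perm.nodup_iff hperm).mp (hlt.imp ne_of_lt)
  · intro hn
    exact List.Pairwise.isChain ((List.Perm.nodup_iff hperm).mpr hn)

-- set intersection is empty iff the lists are disjoint
theorem inter_eq_nil_iff (s t : List Int) : PySem.Set.inter s t = [] ↔ List.Disjoint s t := by
  show s.filter (fun a => t.contains a) = [] ↔ _
  rw [List.filter_eq_nil_iff]
  simp [List.Disjoint]

-- A's double index loop checks exactly pairwise disjointness of the list of sets.
theorem pair_loop_iff_pairwise (ts : List (PySem.Set Int)) :
    ((PySem.List.pyRange 0 ts.length 1).all (fun i =>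
      (PySem.List.pyRange (i + 1) ts.length 1).all (fun j =>
        PySem.Set.inter (PySem.List.pyGetD ts i []) (PySem.List.pyGetD ts j []) == []))) = true
      ↔ ts.Pairwise List.Disjoint := by
  simp only [List.all_eq_true, PySem.List.mem_pyRange_one, beq_iff_eq, and_imp]
  rw [List.pairwise_iff_getElem]
  constructor
  · intro h i j hi hj hij
    have hh := h (i : Int) (by positivity) (by exact_mod_cast hi) (j : Int)
      (by exact_mod_cast hij) (by exact_mod_cast hj)
    rw [PySem.List.pyGetD_eq_getElem ts [] (by positivity) (by exact_mod_cast hi),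
        PySem.List.pyGetD_eq_getElem ts [] (by positivity) (by exact_mod_cast hj)] at hh
    simp only [Int.toNat_natCast] at hh
    exact (inter_eq_nil_iff _ _).mp hh
  · intro h i hi0 hin j hij hjn
    have hi' : i.toNat < ts.length := by omega
    have hj' : j.toNat < ts.length := by omega
    rw [PySem.List.pyGetD_eq_getElem ts [] hi0 hin,
        PySem.List.pyGetD_eq_getElem ts [] (by omega) hjn]
    exact (inter_eq_nil_iff _ _).mpr (h i.toNat j.toNat hi' hj' (by omega))

-- a set comprehension over a list mapped through an injective function
theorem ofList_map_inj (f : Int → Int) (hf : Function.Injective f) (l : List Int) :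
    PySem.Set.ofList (l.map f) = (PySem.Set.ofList l).map f := by
  rw [PySem.Set.ofList_eq_foldl, PySem.Set.ofList_eq_foldl]
  have aux : ∀ (s : List Int), (l.map f).foldl PySem.Set.add (s.map f) = (l.foldl PySem.Set.add s).map f := by
    induction l with
    | nil => intro s; simp
    | cons a l ih =>
      intro s
      simp only [List.map_cons, List.foldl_cons]
      have : PySem.Set.add (s.map f) (f a) = (PySem.Set.add s a).map f := by
        rw [PySem.Set.add_eq_ite, PySem.Set.add_eq_ite]
        by_cases h : a ∈ s
        · simp [h, List.mem_map_of_mem]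
        · have : f a ∉ s.map f := by
            simp only [List.mem_map, not_exists, not_and]
            intro b hb hfb
            exact h (hf hfb ▸ hb)
          simp [h, this]
      rw [this, ih]
  simpa using aux []

-- A returns true iff the flattened multiset has no duplicates.
theorem a_iff_nodup (A offsets : List Int) :
    verify_disjoint A offsets = true ↔
      (offsets.flatMap (fun x => (PySem.Set.ofList A).map (fun a => a + x))).Nodup := by
  unfold verify_disjoint
  simp only [PySem.List.foldl_append_singleton_eq_map, List.nil_append]
  rw [pair_loop_iff_pairwise, List.nodup_flatMap]
  have hg : (fun x => PySem.Set.ofList (A.map (fun a => a + x)))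
      = (fun x => (PySem.Set.ofList A).map (fun a => a + x)) := by
    funext x
    exact ofList_map_inj (fun a => a + x) (add_left_injective x) A
  rw [hg, List.pairwise_map]
  constructor
  · intro h
    refine ⟨fun x _ => ?_, h⟩
    exact (PySem.Set.nodup_ofList A).map (fun a b hab => by omega)
  · intro h
    exact h.2

-- ===== VERDICT (by name: the statement is the Claim_ definition above) =====
theorem verify_disjoint_spec : Claim_equal_verify_disjoint := by
  intro A offsets _
  unfold Spec_verify_disjoint
  exact Bool.eq_iff_iff.mpr ((a_iff_nodup A offsets).trans (alt_iff_nodup A offsets).symm)
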